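-- pv_equiv track=rewrite | github.com/daniel-reich/ubiquitous-fiesta | SaZodzHyFoSv9XKPX_17.py | domino_chain
-- ===== SOURCE A (Python) =====
-- def domino_chain(dominos):
--   ans =''
--   flag = 1
--
--   for i in dominos:
--     if i == '/' or i == ' ':
--       flag = 0
--
--     if flag:
--       ans += '/'
--     else:
--       ans += i
--
--   return ans
-- ===== SOURCE B (Python) =====
-- def domino_chain(dominos):
--   idx = next((i for i, c in enumerate(dominos) if c == '/' or c == ' '), len(dominos))
--   return '/' * idx + dominos[idx:]
-- ===== Notes on version B (the rewrite author's own statement) =====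
-- stated objective: simpler
-- what changed: Replaces the char-by-char flag-and-append loop with computing the boundary index of the first slash-or-space delimiter and building the result as a replicated prefix plus a slice of the rest.
import Mathlib
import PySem

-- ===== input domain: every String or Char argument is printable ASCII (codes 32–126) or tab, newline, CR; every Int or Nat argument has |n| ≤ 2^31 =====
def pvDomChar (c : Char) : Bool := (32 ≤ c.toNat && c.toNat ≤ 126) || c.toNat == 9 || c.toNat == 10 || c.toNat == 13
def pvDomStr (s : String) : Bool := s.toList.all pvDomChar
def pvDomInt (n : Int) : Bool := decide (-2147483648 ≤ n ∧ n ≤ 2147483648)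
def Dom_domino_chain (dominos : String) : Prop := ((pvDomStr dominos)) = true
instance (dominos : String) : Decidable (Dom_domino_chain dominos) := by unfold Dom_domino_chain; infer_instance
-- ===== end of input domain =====

-- B computes the boundary index (first '/' or ' ') and builds the result as two pieces instead of A's char-by-char flag loop; objective: simpler.

-- ===== PORT A =====
-- A: accumulate ans char by char, with a flag cleared at the first '/' or ' '.
def domino_chain (dominos : String) : String :=
  let st := dominos.toList.foldl
    (fun (st : List Char × Bool) i =>
      let flag := if i = '/' ∨ i = ' ' then false else st.2
      (st.1 ++ [if flag then '/' else i], flag))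
    ([], true)
  String.mk st.1

-- ===== PORT B =====
-- B: idx = first position of '/' or ' ' (length if none); '/' * idx + dominos[idx:].
def domino_chain_alt (dominos : String) : String :=
  let l := dominos.toList
  let idx := l.findIdx (fun c => c == '/' || c == ' ')
  String.mk (List.replicate idx '/' ++ l.drop idx)

-- ===== PRECONDITION & SPEC =====
def Spec_domino_chain (dominos : String) (out : String) : Prop := out = domino_chain_alt dominos
instance (dominos : String) (out : String) : Decidable (Spec_domino_chain dominos out) := by unfold Spec_domino_chain; infer_instance

-- ===== CLAIM (what is proved, stated in full; the proofs are below) =====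
def Claim_equal_domino_chain : Prop := ∀ (dominos : String), Dom_domino_chain dominos → Spec_domino_chain dominos (domino_chain dominos)

-- ===== LEMMAS AND PROOFS =====

-- abbreviation for A's loop body (proof-side only)
def dcStep (st : List Char × Bool) (i : Char) : List Char × Bool :=
  let flag := if i = '/' ∨ i = ' ' then false else st.2
  (st.1 ++ [if flag then '/' else i], flag)

lemma dc_foldl_false (l : List Char) (acc : List Char) :
    (l.foldl dcStep (acc, false)).1 = acc ++ l := by
  induction l generalizing acc with
  | nil => simp
  | cons c t ih =>
    simp only [List.foldl_cons, dcStep, ite_self]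
    simpa using ih (acc ++ [c])

lemma dc_foldl_true (l : List Char) (acc : List Char) :
    (l.foldl dcStep (acc, true)).1 =
      acc ++ List.replicate (l.findIdx (fun c => c == '/' || c == ' ')) '/' ++
        l.drop (l.findIdx (fun c => c == '/' || c == ' ')) := by
  induction l generalizing acc with
  | nil => simp
  | cons c t ih =>
    by_cases h : c = '/' ∨ c = ' '
    · have hb : (fun c => c == '/' || c == ' ') c = true := by
        rcases h with h | h <;> simp [h]
      simp only [List.foldl_cons, dcStep, if_pos h, List.findIdx_cons, hb, cond_true]
      simpa using dc_foldl_false t (acc ++ [c])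
    · have hb : (fun c => c == '/' || c == ' ') c = false := by
        simp only [Bool.or_eq_false_iff, beq_eq_false_iff_ne]
        exact ⟨fun h1 => h (Or.inl h1), fun h2 => h (Or.inr h2)⟩
      simp only [List.foldl_cons, dcStep, if_neg h, if_pos trivial, List.findIdx_cons, hb,
        cond_false, List.replicate_succ, List.drop_succ_cons]
      simpa using ih (acc ++ ['/'])

-- ===== VERDICT (by name: the statement is the Claim_ definition above) =====
theorem domino_chain_spec : Claim_equal_domino_chain := by
  intro dominos _
  show String.mk (dominos.toList.foldl dcStep ([], true)).1 = _
  rw [dc_foldl_true]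
  simp [domino_chain_alt]
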